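-- pv_equiv track=rewrite | github.com/particles-pipapo/pipapo | pipapo/utils/voxelize.py | reverse_running_index
-- ===== SOURCE A (Python) =====
-- def reverse_running_index(c, n_dim):
--     """Reverse running index c to ijk.
--
--     Args:
--         c (int): running index
--         n_dim (int): length per dimension
--     Returns:
--         (int,int,int): indices i,j,k
--     """
--     if c < n_dim[0]:
--         return c, 0, 0
--     elif c < n_dim[0] * n_dim[1]:
--         j = c // n_dim[0]
--         i, _, _ = reverse_running_index(c - j * n_dim[0], n_dim)
--         return i, j, 0
--     else:
--         k = c // (n_dim[0] * n_dim[1])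
--         i, j, _ = reverse_running_index(c - k * n_dim[0] * n_dim[1], n_dim)
--         return i, j, k
-- ===== SOURCE B (Python) =====
-- def reverse_running_index(c, n_dim):
--     """Reverse running index c to ijk.
--
--     Args:
--         c (int): running index
--         n_dim (int): length per dimension
--     Returns:
--         (int,int,int): indices i,j,k
--     """
--     if c < n_dim[0]:
--         return c, 0, 0
--     k, rem = divmod(c, n_dim[0] * n_dim[1])
--     j, i = divmod(rem, n_dim[0])
--     return i, j, k
-- ===== Notes on version B (the rewrite author's own statement) =====
-- stated objective: simpler
-- what changed: Replaces the two-level recursion with a direct mixed-radix decomposition: two divmod calls extract k, j, i in one pass, no recursive calls. Pre_ excludes non-positive dimension lengths (with c >= n_dim[0]), outside the natural domain, where A either raises (ZeroDivisionError/RecursionError) or returns accidental negative-index tuples from its nested guards that no caller would specify.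
-- outside the precondition, e.g. on reverse_running_index(5, (2, -3, 1)): A returns (-1, 0, -1), B returns (1, -1, -1); on reverse_running_index(2, (-2, 3, 1)): A returns (-4, 0, -1), B returns (0, 2, -1)
import Mathlib
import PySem

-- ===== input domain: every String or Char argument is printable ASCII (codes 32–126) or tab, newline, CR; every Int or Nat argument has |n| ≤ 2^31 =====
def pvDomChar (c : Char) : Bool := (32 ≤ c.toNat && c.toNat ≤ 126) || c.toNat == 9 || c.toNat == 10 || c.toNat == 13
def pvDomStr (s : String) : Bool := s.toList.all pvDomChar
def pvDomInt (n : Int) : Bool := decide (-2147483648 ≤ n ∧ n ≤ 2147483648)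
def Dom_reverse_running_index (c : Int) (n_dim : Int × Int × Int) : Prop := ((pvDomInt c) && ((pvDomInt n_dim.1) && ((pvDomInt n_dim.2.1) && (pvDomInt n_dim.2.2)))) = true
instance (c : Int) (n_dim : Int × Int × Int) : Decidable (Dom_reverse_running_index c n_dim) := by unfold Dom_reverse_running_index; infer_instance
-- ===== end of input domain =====

-- B replaces A's two-level recursion by a direct mixed-radix divmod decomposition (objective: simpler).

-- ===== PORT A =====
-- Literal port of A's recursion; the fuel argument only makes the recursion total in Lean
-- (inside Pre_ the Python recursion has depth at most 3, so fuel 4 is never exhausted).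
def reverse_running_index_rec (fuel : Nat) (c : Int) (n_dim : Int × Int × Int) : Int × Int × Int :=
  match fuel with
  | 0 => (0, 0, 0)
  | fuel + 1 =>
    if c < n_dim.1 then
      (c, 0, 0)
    else if c < n_dim.1 * n_dim.2.1 then
      let j := PySem.Int.floordiv c n_dim.1
      let r := reverse_running_index_rec fuel (c - j * n_dim.1) n_dim
      (r.1, j, 0)
    else
      let k := PySem.Int.floordiv c (n_dim.1 * n_dim.2.1)
      let r := reverse_running_index_rec fuel (c - k * n_dim.1 * n_dim.2.1) n_dim
      (r.1, r.2.1, k)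

def reverse_running_index (c : Int) (n_dim : Int × Int × Int) : Int × Int × Int :=
  reverse_running_index_rec 4 c n_dim

-- ===== PORT B =====
def reverse_running_index_alt (c : Int) (n_dim : Int × Int × Int) : Int × Int × Int :=
  if c < n_dim.1 then
    (c, 0, 0)
  else
    -- k, rem = divmod(c, n_dim[0] * n_dim[1]); j, i = divmod(rem, n_dim[0])
    let k := PySem.Int.floordiv c (n_dim.1 * n_dim.2.1)
    let rem := PySem.Int.mod c (n_dim.1 * n_dim.2.1)
    let j := PySem.Int.floordiv rem n_dim.1
    let i := PySem.Int.mod rem n_dim.1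
    (i, j, k)

-- ===== PRECONDITION & SPEC =====
-- Pre_ excludes non-positive dimension lengths (with c ≥ n_dim[0]), outside the natural domain,
-- where A either raises (ZeroDivisionError / RecursionError) or returns accidental negative-index
-- tuples from its nested guards that no caller would specify.
def Pre_reverse_running_index (c : Int) (n_dim : Int × Int × Int) : Prop :=
  c < n_dim.1 ∨ (0 < n_dim.1 ∧ 0 < n_dim.2.1)
instance (c : Int) (n_dim : Int × Int × Int) : Decidable (Pre_reverse_running_index c n_dim) := by
  unfold Pre_reverse_running_index; infer_instance

def pvWitness_reverse_running_index : Int × (Int × Int × Int) := (17, (3, 4, 5))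

def Spec_reverse_running_index (c : Int) (n_dim : Int × Int × Int) (out : Int × Int × Int) : Prop := out = reverse_running_index_alt c n_dim
instance (c : Int) (n_dim : Int × Int × Int) (out : Int × Int × Int) : Decidable (Spec_reverse_running_index c n_dim out) := by unfold Spec_reverse_running_index; infer_instance

-- ===== CLAIM (what is proved, stated in full; the proofs are below) =====
def Claim_equal_reverse_running_index : Prop := ∀ (c : Int) (n_dim : Int × Int × Int), Dom_reverse_running_index c n_dim → Pre_reverse_running_index c n_dim → Spec_reverse_running_index c n_dim (reverse_running_index c n_dim)

-- ===== LEMMAS AND PROOFS =====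

-- ===== VERDICT (by name: the statement is the Claim_ definition above) =====
theorem reverse_running_index_spec : Claim_equal_reverse_running_index := by
  rintro c ⟨n0, n1, n2⟩ _ hpre
  unfold Spec_reverse_running_index reverse_running_index reverse_running_index_alt
  by_cases h1 : c < n0
  · simp [reverse_running_index_rec, h1]
  · rcases hpre with h | ⟨hn0, hn1⟩
    · omega
    have hp : 0 < n0 * n1 := mul_pos hn0 hn1
    have hc0 : 0 ≤ c := by omega
    by_cases h2 : c < n0 * n1
    · -- A takes its middle branch; B's outer divmod is (0, c)
      have hk0 : PySem.Int.floordiv c (n0 * n1) = 0 := by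
        rw [PySem.Int.floordiv_eq_iff_of_pos hp]; omega
      have hr : PySem.Int.mod c (n0 * n1) = c := by
        have h := PySem.Int.floordiv_mul_add_mod c (n0 * n1)
        rw [hk0] at h; simpa using h
      have hdm := PySem.Int.floordiv_mul_add_mod c n0
      have harg : c - PySem.Int.floordiv c n0 * n0 = PySem.Int.mod c n0 := by omega
      have hlt : PySem.Int.mod c n0 < n0 := PySem.Int.mod_lt c hn0
      simp only [reverse_running_index_rec, if_neg h1, if_pos h2, harg, if_pos hlt,
        hk0, hr]
    · -- A takes its last branch with argument c mod (n0*n1)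
      have hdm := PySem.Int.floordiv_mul_add_mod c (n0 * n1)
      have harg : c - PySem.Int.floordiv c (n0 * n1) * n0 * n1 = PySem.Int.mod c (n0 * n1) := by
        rw [show PySem.Int.floordiv c (n0 * n1) * n0 * n1
             = PySem.Int.floordiv c (n0 * n1) * (n0 * n1) from by ring]
        omega
      have hr0 : 0 ≤ PySem.Int.mod c (n0 * n1) := PySem.Int.mod_nonneg c hp
      have hrlt : PySem.Int.mod c (n0 * n1) < n0 * n1 := PySem.Int.mod_lt c hp
      set r := PySem.Int.mod c (n0 * n1) with hrdef
      by_cases h3 : r < n0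
      · -- inner call returns (r, 0, 0); B's inner divmod is (0, r)
        have hj0 : PySem.Int.floordiv r n0 = 0 := by
          rw [PySem.Int.floordiv_eq_iff_of_pos hn0]; omega
        have hi : PySem.Int.mod r n0 = r := by
          have h := PySem.Int.floordiv_mul_add_mod r n0
          rw [hj0] at h; simpa using h
        simp only [reverse_running_index_rec, if_neg h1, if_neg h2, harg, if_pos h3,
          hj0, hi]
      · -- inner call takes the middle branch on r
        have hdm2 := PySem.Int.floordiv_mul_add_mod r n0
        have harg2 : r - PySem.Int.floordiv r n0 * n0 = PySem.Int.mod r n0 := by omega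
        have hlt2 : PySem.Int.mod r n0 < n0 := PySem.Int.mod_lt r hn0
        simp only [reverse_running_index_rec, if_neg h1, if_neg h2, harg, if_neg h3,
          if_pos hrlt, harg2, if_pos hlt2]
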